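-- pv_equiv track=rewrite | github.com/GoogleCloudPlatform/professional-services-data-validator | data_validation/query_builder/custom_query_builder.py | get_calculated_columns
-- ===== SOURCE A (Python) =====
-- def get_calculated_columns(df_columns):
--     """Returns the dictionary containing the calculated fields."""
--
--     calculated_columns = {}
--     calculated_columns["columns"] = df_columns
--     calculated_columns["cast"] = []
--     for column in df_columns:
--         current_column = "cast__" + column
--         calculated_columns["cast"].append(current_column)
--
--     calculated_columns["ifnull"] = []
--     for column in calculated_columns["cast"]:
--         current_column = "ifnull__" + column
--         calculated_columns["ifnull"].append(current_column)
--
--     calculated_columns["rstrip"] = []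
--     for column in calculated_columns["ifnull"]:
--         current_column = "rstrip__" + column
--         calculated_columns["rstrip"].append(current_column)
--
--     calculated_columns["upper"] = []
--     for column in calculated_columns["rstrip"]:
--         current_column = "upper__" + column
--         calculated_columns["upper"].append(current_column)
--
--     return calculated_columns
-- ===== SOURCE B (Python) =====
-- def get_calculated_columns(df_columns):
--     """Returns the dictionary containing the calculated fields."""
--     cast, ifnull, rstrip, upper = [], [], [], []
--     for column in df_columns:
--         c = "cast__" + column
--         i = "ifnull__" + c
--         r = "rstrip__" + i
--         u = "upper__" + r
--         cast.append(c)
--         ifnull.append(i)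
--         rstrip.append(r)
--         upper.append(u)
--     return {
--         "columns": df_columns,
--         "cast": cast,
--         "ifnull": ifnull,
--         "rstrip": rstrip,
--         "upper": upper,
--     }
-- ===== Notes on version B (the rewrite author's own statement) =====
-- stated objective: simpler
-- what changed: Replaces four sequential loops (each re-scanning the previous derived list) with a single pass over df_columns that builds all four prefixed lists at once, returned as one dict literal.
import Mathlib
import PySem

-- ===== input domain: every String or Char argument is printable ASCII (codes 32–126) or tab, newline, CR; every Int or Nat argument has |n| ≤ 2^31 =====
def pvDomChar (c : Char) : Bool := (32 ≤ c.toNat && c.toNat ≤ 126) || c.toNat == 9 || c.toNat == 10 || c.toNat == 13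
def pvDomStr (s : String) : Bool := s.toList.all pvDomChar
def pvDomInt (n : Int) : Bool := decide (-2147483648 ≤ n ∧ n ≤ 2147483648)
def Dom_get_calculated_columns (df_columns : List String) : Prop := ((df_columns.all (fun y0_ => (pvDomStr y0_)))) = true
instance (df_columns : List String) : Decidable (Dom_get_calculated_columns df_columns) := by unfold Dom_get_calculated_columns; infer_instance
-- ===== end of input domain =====

-- B fuses A's four sequential loops into one pass over df_columns; objective: simpler (one traversal, same result).

-- ===== PORT A =====
-- A repeatedly appends to a fresh list per key; each loop scans the previous derived list.
def get_calculated_columns (df_columns : List String) : List (String × List String) :=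
  let cast := df_columns.foldl (fun acc column => acc ++ ["cast__" ++ column]) []
  let ifnull := cast.foldl (fun acc column => acc ++ ["ifnull__" ++ column]) []
  let rstrip := ifnull.foldl (fun acc column => acc ++ ["rstrip__" ++ column]) []
  let upper := rstrip.foldl (fun acc column => acc ++ ["upper__" ++ column]) []
  [("columns", df_columns), ("cast", cast), ("ifnull", ifnull), ("rstrip", rstrip), ("upper", upper)]

-- ===== PORT B =====
-- single pass: for each column compute the four derived names and cons them onto the four lists
def gccFuse : List String → List String × List String × List String × List String
  | [] => ([], [], [], [])
  | column :: rest =>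
    let c := "cast__" ++ column
    let i := "ifnull__" ++ c
    let r := "rstrip__" ++ i
    let u := "upper__" ++ r
    let (cs, is_, rs, us) := gccFuse rest
    (c :: cs, i :: is_, r :: rs, u :: us)

def get_calculated_columns_alt (df_columns : List String) : List (String × List String) :=
  let (cast, ifnull, rstrip, upper) := gccFuse df_columns
  [("columns", df_columns), ("cast", cast), ("ifnull", ifnull), ("rstrip", rstrip), ("upper", upper)]

-- ===== PRECONDITION & SPEC =====
def Spec_get_calculated_columns (df_columns : List String) (out : List (String × List String)) : Prop := out = get_calculated_columns_alt df_columns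
instance (df_columns : List String) (out : List (String × List String)) : Decidable (Spec_get_calculated_columns df_columns out) := by unfold Spec_get_calculated_columns; infer_instance

-- ===== CLAIM (what is proved, stated in full; the proofs are below) =====
def Claim_equal_get_calculated_columns : Prop := ∀ (df_columns : List String), Dom_get_calculated_columns df_columns → Spec_get_calculated_columns df_columns (get_calculated_columns df_columns)

-- ===== LEMMAS AND PROOFS =====
theorem foldl_append_map (f : String → String) (xs : List String) :
    xs.foldl (fun acc column => acc ++ [f column]) [] = xs.map f := by
  have h : ∀ (xs : List String) (a : List String),
      xs.foldl (fun acc column => acc ++ [f column]) a = a ++ xs.map f := by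
    intro xs
    induction xs with
    | nil => simp [List.foldl]
    | cons x t ih => intro a; simp [List.foldl, ih]
  simpa using h xs []

theorem gccFuse_eq (xs : List String) :
    gccFuse xs = (xs.map (fun c => "cast__" ++ c),
                  xs.map (fun c => "ifnull__" ++ ("cast__" ++ c)),
                  xs.map (fun c => "rstrip__" ++ ("ifnull__" ++ ("cast__" ++ c))),
                  xs.map (fun c => "upper__" ++ ("rstrip__" ++ ("ifnull__" ++ ("cast__" ++ c))))) := by
  induction xs with
  | nil => simp [gccFuse]
  | cons x t ih => simp [gccFuse, ih]

-- ===== VERDICT (by name: the statement is the Claim_ definition above) =====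
theorem get_calculated_columns_spec : Claim_equal_get_calculated_columns := by
  intro df_columns _
  show get_calculated_columns df_columns = get_calculated_columns_alt df_columns
  simp only [get_calculated_columns, get_calculated_columns_alt, gccFuse_eq,
    foldl_append_map, List.map_map]
  rfl
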